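-- pv_equiv track=rewrite | github.com/Tristan-Clue/Everbody-Codes | Day6/quest6-3.py | first_find_mentors
-- ===== SOURCE A (Python) =====
-- def first_find_mentors(char, string, index, str_len):
--     rtn = 0
--     iter = 0
--     i = index - 1000
--     neg = 0
--     if (i < 0):
--         neg = i
--         i = 0
--     if char == 'a':
--         while iter < 2001 + neg:
--             if (string[i % str_len] == 'A'):
--                 rtn += 1
--             iter += 1
--             i += 1
--     elif char == 'b':
--         while iter < 2001 + neg:
--             if (string[i % str_len] == 'B'):
--                 rtn += 1
--             iter += 1
--             i += 1
--     elif char == 'c':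
--         while iter < 2001 + neg:
--             if (string[i % str_len] == 'C'):
--                 rtn += 1
--             iter += 1
--             i += 1
-- #    print (rtn)
--     return (rtn)
-- ===== SOURCE B (Python) =====
-- def first_find_mentors(char, string, index, str_len):
--     target = {'a': 'A', 'b': 'B', 'c': 'C'}.get(char)
--     if target is None:
--         return 0
--     neg = min(index - 1000, 0)
--     start = max(index - 1000, 0)
--     n = 2001 + neg
--     if n <= 0:
--         return 0
--     full = n // str_len
--     rem = n % str_len
--     total = sum(1 for ch in string[:str_len] if ch == target)
--     partial = sum(1 for k in range(rem) if string[(start + k) % str_len] == target)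
--     return full * total + partial
-- ===== Notes on version B (the rewrite author's own statement) =====
-- stated objective: alternative
-- what changed: Replaces A's scan of all up-to-2001 cyclic positions by closed-form full-revolution arithmetic: n//str_len full revolutions times the target count in string[:str_len], plus one pass over the n%str_len remainder positions.
-- outside the precondition, e.g. on first_find_mentors('a', 'AB', 0, -2): A returns 501, B returns 0; on first_find_mentors('a', 'AB', -999, 5): A returns 1, B returns 1
import Mathlib
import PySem

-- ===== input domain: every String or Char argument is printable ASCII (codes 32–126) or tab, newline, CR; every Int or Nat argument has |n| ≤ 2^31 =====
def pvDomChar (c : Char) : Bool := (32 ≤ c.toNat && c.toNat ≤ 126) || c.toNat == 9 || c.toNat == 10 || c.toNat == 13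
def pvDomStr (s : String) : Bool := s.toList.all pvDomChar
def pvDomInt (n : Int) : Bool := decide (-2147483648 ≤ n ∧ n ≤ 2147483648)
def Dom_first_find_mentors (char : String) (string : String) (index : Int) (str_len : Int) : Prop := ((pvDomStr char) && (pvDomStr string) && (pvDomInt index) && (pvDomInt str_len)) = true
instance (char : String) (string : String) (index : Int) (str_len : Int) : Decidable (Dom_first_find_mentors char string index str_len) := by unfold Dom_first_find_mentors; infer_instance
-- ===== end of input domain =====

-- B replaces A's scan of up to 2001 cyclic positions by full-revolution arithmetic
-- (full·count-in-one-period plus one remainder-segment pass); equal on Pre_ (alternative decomposition).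

-- ===== PORT A =====
-- A's while loop: runs while iter < 2001+neg, reading string[i % str_len] (none = IndexError, excluded by Pre_).
def pvLoopA (t : Char) (s : String) (L : Int) : Nat → Int → Int → Int
  | 0, _, rtn => rtn
  | Nat.succ m, i, rtn =>
      pvLoopA t s L m (i + 1)
        (match PySem.Str.pyGet? s (PySem.Int.mod i L) with
         | some c => if c = t then rtn + 1 else rtn
         | none => rtn)

def first_find_mentors (char : String) (string : String) (index : Int) (str_len : Int) : Int :=
  let i0 := index - 1000
  let neg : Int := if i0 < 0 then i0 else 0
  let i : Int := if i0 < 0 then 0 else i0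
  if char = "a" then pvLoopA 'A' string str_len (2001 + neg).toNat i 0
  else if char = "b" then pvLoopA 'B' string str_len (2001 + neg).toNat i 0
  else if char = "c" then pvLoopA 'C' string str_len (2001 + neg).toNat i 0
  else 0

-- ===== PORT B =====
def first_find_mentors_alt (char : String) (string : String) (index : Int) (str_len : Int) : Int :=
  let target? : Option Char :=
    if char = "a" then some 'A'
    else if char = "b" then some 'B'
    else if char = "c" then some 'C'
    else none
  match target? with
  | none => 0
  | some t =>
      let neg := min (index - 1000) 0
      let start := max (index - 1000) 0
      let n := 2001 + neg
      if n ≤ 0 then 0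
      else
        let full := PySem.Int.floordiv n str_len
        let rem := PySem.Int.mod n str_len
        -- sum(1 for ch in string[:str_len] if ch == target): a 0/1-sum is a countP
        let total : Int :=
          if full = 0 then 0
          else ((PySem.Str.slice string none (some str_len)).toList.countP (fun ch => ch == t) : Nat)
        -- sum(1 for k in range(rem) if string[(start+k) % str_len] == target)
        let part : Int :=
          ((PySem.List.pyRange 0 rem 1).countP
            (fun k => PySem.Str.pyGet? string (PySem.Int.mod (start + k) str_len) == some t) : Nat)
        full * total + part

-- ===== PRECONDITION & SPEC =====
-- Pre_ excludes the inputs where A's cyclic indexing raises (str_len = 0 → ZeroDivisionError,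
-- an accessed index out of range → IndexError), and with them (cited in the claim) the exotic
-- still-returning cases where str_len is negative or exceeds len(string) yet every accessed
-- cyclic index happens to stay in range.
def Pre_first_find_mentors (char : String) (string : String) (index : Int) (str_len : Int) : Prop :=
  (char = "a" ∨ char = "b" ∨ char = "c") →
    (2001 + min (index - 1000) 0 ≤ 0 ∨ (0 < str_len ∧ str_len ≤ (string.toList.length : Int)))
instance (char : String) (string : String) (index : Int) (str_len : Int) : Decidable (Pre_first_find_mentors char string index str_len) := by unfold Pre_first_find_mentors; infer_instance

def pvWitness_first_find_mentors : String × String × Int × Int := ("a", "AB", 0, 2)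

def Spec_first_find_mentors (char : String) (string : String) (index : Int) (str_len : Int) (out : Int) : Prop := out = first_find_mentors_alt char string index str_len
instance (char : String) (string : String) (index : Int) (str_len : Int) (out : Int) : Decidable (Spec_first_find_mentors char string index str_len out) := by unfold Spec_first_find_mentors; infer_instance

-- ===== CLAIM (what is proved, stated in full; the proofs are below) =====
def Claim_equal_first_find_mentors : Prop := ∀ (char : String) (string : String) (index : Int) (str_len : Int), Dom_first_find_mentors char string index str_len → Pre_first_find_mentors char string index str_len → Spec_first_find_mentors char string index str_len (first_find_mentors char string index str_len)

-- ===== LEMMAS AND PROOFS =====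

-- 0/1 indicator of A's test at absolute position i
def pvInd (t : Char) (s : String) (L i : Int) : Int :=
  if PySem.Str.pyGet? s (PySem.Int.mod i L) == some t then 1 else 0

-- count of hits over the m consecutive positions i, i+1, …, i+m-1
def pvCnt (t : Char) (s : String) (L : Int) : Int → Nat → Int
  | _, 0 => 0
  | i, Nat.succ m => pvInd t s L i + pvCnt t s L (i + 1) m

theorem pvLoopA_eq (t : Char) (s : String) (L : Int) :
    ∀ (m : Nat) (i rtn : Int), pvLoopA t s L m i rtn = rtn + pvCnt t s L i m := by
  intro m
  induction m with
  | zero => intro i rtn; simp [pvLoopA, pvCnt]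
  | succ m ih =>
      intro i rtn
      simp only [pvLoopA, ih, pvCnt, pvInd, PySem.Str.pyGet?, PySem.Chars.pyGet?]
      split
      · next c heq => by_cases hc : c = t <;> (simp [heq, hc]; try ring)
      · next heq => simp [heq]; try ring

theorem pvCnt_add (t : Char) (s : String) (L : Int) :
    ∀ (a : Nat) (i : Int) (b : Nat),
      pvCnt t s L i (a + b) = pvCnt t s L i a + pvCnt t s L (i + (a : Int)) b := by
  intro a
  induction a with
  | zero => intro i b; simp [pvCnt]
  | succ a ih =>
      intro i b
      have h1 : a + 1 + b = (a + b) + 1 := by omega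
      rw [h1]
      show pvInd t s L i + pvCnt t s L (i + 1) (a + b) = _
      rw [ih]
      have h2 : i + ((a : Nat) + 1 : Nat) = (i + 1) + (a : Int) := by push_cast; ring
      show _ = pvInd t s L i + pvCnt t s L (i + 1) a + pvCnt t s L (i + ((a : Nat) + 1 : Nat)) b
      rw [h2]
      ring

theorem pvCnt_congr (t : Char) (s : String) (L : Int) (hL : 0 < L) :
    ∀ (m : Nat) (i j : Int), i % L = j % L → pvCnt t s L i m = pvCnt t s L j m := by
  intro m
  induction m with
  | zero => intro i j _; rfl
  | succ m ih =>
      intro i j h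
      show pvInd t s L i + _ = pvInd t s L j + _
      have hind : pvInd t s L i = pvInd t s L j := by
        unfold pvInd
        rw [PySem.Int.mod_eq_emod_of_pos hL, PySem.Int.mod_eq_emod_of_pos hL, h]
      rw [hind, ih (i + 1) (j + 1) (by rw [Int.add_emod, h, ← Int.add_emod])]

theorem pvCnt_period (t : Char) (s : String) (L : Int) (hL : 0 < L) (i : Int) :
    pvCnt t s L i L.toNat = pvCnt t s L 0 L.toNat := by
  set j := i % L with hj
  have hj0 : 0 ≤ j := Int.emod_nonneg i (ne_of_gt hL)
  have hjL : j < L := Int.emod_lt_of_pos i hL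
  have h1 : pvCnt t s L i L.toNat = pvCnt t s L j L.toNat :=
    pvCnt_congr t s L hL _ i j (by rw [hj, Int.emod_emod_of_dvd i dvd_rfl])
  have hsplit : L.toNat = (L - j).toNat + j.toNat := by omega
  have hcast1 : ((L - j).toNat : Int) = L - j := Int.toNat_of_nonneg (by omega)
  have hcast2 : ((j.toNat : Nat) : Int) = j := Int.toNat_of_nonneg hj0
  rw [h1, hsplit, pvCnt_add, hcast1]
  have h2 : pvCnt t s L (j + (L - j)) j.toNat = pvCnt t s L 0 j.toNat := by
    apply pvCnt_congr t s L hL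
    have : j + (L - j) = L := by ring
    rw [this, Int.emod_self, Int.zero_emod]
  rw [h2]
  have hsplit2 : (L - j).toNat + j.toNat = j.toNat + (L - j).toNat := by omega
  rw [hsplit2, pvCnt_add, hcast2]
  have h3 : (0 : Int) + j = j := by ring
  rw [h3]
  ring

theorem pvCnt_full (t : Char) (s : String) (L : Int) (hL : 0 < L) :
    ∀ (q : Nat) (i : Int) (r : Nat),
      pvCnt t s L i (q * L.toNat + r) = (q : Int) * pvCnt t s L 0 L.toNat + pvCnt t s L i r := by
  intro q
  induction q with
  | zero => intro i r; simp
  | succ q ih =>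
      intro i r
      have h1 : (q + 1) * L.toNat + r = L.toNat + (q * L.toNat + r) := by ring
      rw [h1, pvCnt_add, pvCnt_period t s L hL, ih]
      have hcast : ((L.toNat : Nat) : Int) = L := Int.toNat_of_nonneg hL.le
      have h2 : pvCnt t s L (i + (L.toNat : Int)) r = pvCnt t s L i r := by
        apply pvCnt_congr t s L hL
        rw [hcast, show i + L = i + L * 1 from by ring, Int.add_mul_emod_self_left]
      rw [h2]
      push_cast
      ring

-- over a non-wrapping segment pvCnt is a plain countP on the string's characters
theorem pvCnt_seg (t : Char) (s : String) (L : Int) (hL : 0 < L)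
    (hlen : L ≤ (s.toList.length : Int)) :
    ∀ (m : Nat) (i : Int), 0 ≤ i → i + (m : Int) ≤ L →
      pvCnt t s L i m = (((s.toList.drop i.toNat).take m).countP (fun c => c == t) : Int) := by
  intro m
  induction m with
  | zero => intro i _ _; simp [pvCnt]
  | succ m ih =>
      intro i h0 hub
      have hiL : i < L := by omega
      have hmod : PySem.Int.mod i L = i := by
        rw [PySem.Int.mod_eq_emod_of_pos hL, Int.emod_eq_of_lt h0 hiL]
      have hilen : i < (s.toList.length : Int) := lt_of_lt_of_le hiL hlen
      have hlt : i.toNat < s.toList.length := by omega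
      have hget : PySem.Str.pyGet? s i = some (s.toList[i.toNat]) :=
        PySem.List.pyGet?_eq_some_getElem s.toList h0 hilen
      have hdrop : s.toList.drop i.toNat = s.toList[i.toNat] :: s.toList.drop (i.toNat + 1) :=
        List.drop_eq_getElem_cons hlt
      have hnext : (i + 1).toNat = i.toNat + 1 := by omega
      show pvInd t s L i + pvCnt t s L (i + 1) m = _
      rw [hdrop, List.take_succ_cons, List.countP_cons, ih (i + 1) (by omega) (by omega),
          hnext]
      unfold pvInd
      rw [hmod, hget]
      by_cases hc : s.toList[i.toNat] = t
      · simp [hc]; ring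
      · simp [hc]

theorem pvCnt_eq_countP_range (t : Char) (s : String) (L : Int) :
    ∀ (m : Nat) (i : Int),
      pvCnt t s L i m =
        ((List.range m).countP
          (fun (k : Nat) => PySem.Str.pyGet? s (PySem.Int.mod (i + (k : Int)) L) == some t) : Int) := by
  intro m
  induction m with
  | zero => intro i; simp [pvCnt]
  | succ m ih =>
      intro i
      rw [List.range_succ_eq_map]
      show pvInd t s L i + pvCnt t s L (i + 1) m = _
      rw [List.countP_cons, List.countP_map, ih (i + 1)]
      have hfun :
          ((fun (k : Nat) => PySem.Str.pyGet? s (PySem.Int.mod (i + (k : Int)) L) == some t) ∘ Nat.succ) =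
            (fun (k : Nat) => PySem.Str.pyGet? s (PySem.Int.mod ((i + 1) + (k : Int)) L) == some t) := by
        funext k
        simp only [Function.comp]
        push_cast
        rw [show i + ((k : Int) + 1) = (i + 1) + (k : Int) from by ring]
      rw [hfun]
      unfold pvInd
      simp [PySem.Str.pyGet?, PySem.Chars.pyGet?]
      ring

-- the main per-branch computation, shared by the three letters
theorem pv_branch (t : Char) (s : String) (L i0 : Int) (hL : 0 < L)
    (hlen : L ≤ (s.toList.length : Int)) (hn : ¬ 2001 + min i0 0 ≤ 0) :
    pvLoopA t s L (2001 + (if i0 < 0 then i0 else 0)).toNat (if i0 < 0 then 0 else i0) 0 =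
      PySem.Int.floordiv (2001 + min i0 0) L *
          (if PySem.Int.floordiv (2001 + min i0 0) L = 0 then (0 : Int)
           else (((PySem.Str.slice s none (some L)).toList.countP (fun ch => ch == t) : Nat) : Int)) +
        ((PySem.List.pyRange 0 (PySem.Int.mod (2001 + min i0 0) L) 1).countP
          (fun k =>
            PySem.Str.pyGet? s (PySem.Int.mod (max i0 0 + k) L) == some t) : Nat) := by
  set n : Int := 2001 + min i0 0 with hn_def
  have hnpos : 0 < n := by omega
  have hneg : (if i0 < 0 then i0 else 0) = min i0 0 := by split_ifs <;> omega
  have hstart : (if i0 < 0 then 0 else i0) = max i0 0 := by split_ifs <;> omega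
  set start : Int := max i0 0 with hstart_def
  rw [hneg, hstart, ← hn_def]
  rw [pvLoopA_eq, zero_add]
  -- arithmetic decomposition of the fuel
  have hq0 : 0 ≤ n / L := Int.ediv_nonneg hnpos.le hL.le
  have hr0 : 0 ≤ n % L := Int.emod_nonneg n (ne_of_gt hL)
  have hrL : n % L < L := Int.emod_lt_of_pos n hL
  have heq : L * (n / L) + n % L = n := Int.mul_ediv_add_emod n L
  have hNat : n.toNat = (n / L).toNat * L.toNat + (n % L).toNat := by
    have h1 : (((n / L).toNat * L.toNat + (n % L).toNat : Nat) : Int) = n := by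
      push_cast [Int.toNat_of_nonneg hq0, Int.toNat_of_nonneg hL.le, Int.toNat_of_nonneg hr0]
      linarith [heq]
    omega
  rw [hNat, pvCnt_full t s L hL]
  -- the full-revolution count
  have htotal : pvCnt t s L 0 L.toNat =
      (((PySem.Str.slice s none (some L)).toList.countP (fun ch => ch == t) : Nat) : Int) := by
    rw [pvCnt_seg t s L hL hlen L.toNat 0 le_rfl (by rw [Int.toNat_of_nonneg hL.le]; omega)]
    rw [PySem.Str.toList_slice]
    show _ = ((PySem.List.slice s.toList none (some L)).countP _ : Int)
    rw [PySem.List.slice_to s.toList hL.le]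
    simp
  -- the remainder-segment count
  have hpartial : pvCnt t s L start (n % L).toNat =
      (((PySem.List.pyRange 0 (PySem.Int.mod n L) 1).countP
        (fun k => PySem.Str.pyGet? s (PySem.Int.mod (start + k) L) == some t) : Nat) : Int) := by
    rw [pvCnt_eq_countP_range]
    rw [PySem.Int.mod_eq_emod_of_pos hL, PySem.List.pyRange_one, List.countP_map]
    simp only [Int.sub_zero]
    congr 1
    apply List.countP_congr
    intro k _
    simp [Function.comp, PySem.Str.pyGet?, PySem.Chars.pyGet?]
  rw [htotal, hpartial]
  rw [PySem.Int.floordiv_eq_ediv_of_pos hL, PySem.Int.mod_eq_emod_of_pos hL]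
  rw [Int.toNat_of_nonneg hq0]
  by_cases hfull : n / L = 0
  · rw [if_pos hfull, hfull]; ring
  · rw [if_neg hfull]

theorem first_find_mentors_spec : Claim_equal_first_find_mentors := by
  intro char string index str_len _hdom hpre
  unfold Spec_first_find_mentors first_find_mentors first_find_mentors_alt
  by_cases hn : 2001 + min (index - 1000) 0 ≤ 0
  · have hneg : (if index - 1000 < 0 then index - 1000 else 0) = min (index - 1000) 0 := by
      split_ifs <;> omega
    have hfuel : (2001 + (if index - 1000 < 0 then index - 1000 else 0)).toNat = 0 := by
      rw [hneg]; omega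
    simp only [hfuel]
    by_cases hca : char = "a" <;> by_cases hcb : char = "b" <;> by_cases hcc : char = "c" <;>
      simp [hca, hcb, hcc, hn, pvLoopA]
  · by_cases hca : char = "a"
    · obtain ⟨hL, hlen⟩ := (hpre (Or.inl hca)).resolve_left hn
      subst hca
      simp only [String.reduceEq, reduceIte, if_neg hn]
      exact pv_branch 'A' string str_len (index - 1000) hL hlen hn
    · by_cases hcb : char = "b"
      · obtain ⟨hL, hlen⟩ := (hpre (Or.inr (Or.inl hcb))).resolve_left hn
        subst hcb
        simp only [String.reduceEq, reduceIte, if_neg hn]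
        exact pv_branch 'B' string str_len (index - 1000) hL hlen hn
      · by_cases hcc : char = "c"
        · obtain ⟨hL, hlen⟩ := (hpre (Or.inr (Or.inr hcc))).resolve_left hn
          subst hcc
          simp only [String.reduceEq, reduceIte, if_neg hn]
          exact pv_branch 'C' string str_len (index - 1000) hL hlen hn
        · simp [hca, hcb, hcc]
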